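-- pv_equiv track=rewrite | github.com/rayaanrizwan1234/Network-Resource-Management | BP/H-BFD.py | bestFit
-- ===== SOURCE A (Python) =====
-- def bestFit(bandwidth, residualNetworkCap):
--     best_fit = -1
--     best_fit_value = -1
--     for i in range(len(residualNetworkCap)):
--         if residualNetworkCap[i] >= bandwidth and (best_fit == -1 or residualNetworkCap[i] < best_fit_value):
--             best_fit = i
--             best_fit_value = residualNetworkCap[i]
--     return best_fit
-- ===== SOURCE B (Python) =====
-- def bestFit(bandwidth, residualNetworkCap):
--     order = sorted(range(len(residualNetworkCap)), key=lambda i: residualNetworkCap[i])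
--     for i in order:
--         if residualNetworkCap[i] >= bandwidth:
--             return i
--     return -1
-- ===== Notes on version B (the rewrite author's own statement) =====
-- stated objective: alternative
-- what changed: Replaces the running-best scan (with -1 sentinels) by sorting the indices by capacity (stable sort keeps the first-occurrence tie-break) and returning the first index in sorted order whose capacity meets the bandwidth.
import Mathlib
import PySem

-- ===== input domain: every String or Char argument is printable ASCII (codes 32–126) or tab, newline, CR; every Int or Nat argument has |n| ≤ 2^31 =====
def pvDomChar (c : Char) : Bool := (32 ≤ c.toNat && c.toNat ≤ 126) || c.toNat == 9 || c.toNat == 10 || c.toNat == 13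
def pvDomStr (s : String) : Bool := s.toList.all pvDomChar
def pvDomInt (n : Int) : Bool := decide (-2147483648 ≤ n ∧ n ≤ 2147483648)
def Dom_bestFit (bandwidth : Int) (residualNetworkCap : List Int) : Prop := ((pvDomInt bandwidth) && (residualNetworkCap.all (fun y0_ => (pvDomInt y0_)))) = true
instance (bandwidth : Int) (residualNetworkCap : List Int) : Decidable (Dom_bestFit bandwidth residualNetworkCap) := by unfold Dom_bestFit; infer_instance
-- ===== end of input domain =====

-- B replaces A's single running-best scan (with -1 sentinels) by sorting the indices by capacity
-- (the stable sort keeps the first-occurrence tie-break) and returning the first index in sorted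
-- order whose capacity meets the bandwidth; objective: alternative algorithm, not faster.

-- ===== PORT A =====
-- loop body of A; indexing residualNetworkCap[i] is exact since i ranges over range(len(...))
def bestFitStep (bandwidth : Int) (residualNetworkCap : List Int) (st : Int × Int) (i : Nat) : Int × Int :=
  let v := residualNetworkCap.getD i 0
  if bandwidth ≤ v ∧ (st.1 = -1 ∨ v < st.2) then ((i : Int), v) else st

def bestFit (bandwidth : Int) (residualNetworkCap : List Int) : Int :=
  ((List.range residualNetworkCap.length).foldl (bestFitStep bandwidth residualNetworkCap) (-1, -1)).1

-- ===== PORT B =====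
-- sorted(range(n), key=lambda i: caps[i]) then the first qualifying index, else -1
def bestFit_alt (bandwidth : Int) (residualNetworkCap : List Int) : Int :=
  let order := PySem.List.sorted (List.range residualNetworkCap.length)
    (fun i => residualNetworkCap.getD i 0)
  match order.find? (fun i => decide (bandwidth ≤ residualNetworkCap.getD i 0)) with
  | some i => (i : Int)
  | none => -1

-- ===== PRECONDITION & SPEC =====
def Spec_bestFit (bandwidth : Int) (residualNetworkCap : List Int) (out : Int) : Prop := out = bestFit_alt bandwidth residualNetworkCap
instance (bandwidth : Int) (residualNetworkCap : List Int) (out : Int) : Decidable (Spec_bestFit bandwidth residualNetworkCap out) := by unfold Spec_bestFit; infer_instance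

-- ===== CLAIM (what is proved, stated in full; the proofs are below) =====
def Claim_equal_bestFit : Prop := ∀ (bandwidth : Int) (residualNetworkCap : List Int), Dom_bestFit bandwidth residualNetworkCap → Spec_bestFit bandwidth residualNetworkCap (bestFit bandwidth residualNetworkCap)

-- ===== LEMMAS AND PROOFS =====

-- the lexicographic order on (capacity, index): both programs return its minimum over qualifying indices
def lexLt (caps : List Int) (a b : Nat) : Prop :=
  caps.getD a 0 < caps.getD b 0 ∨ (caps.getD a 0 = caps.getD b 0 ∧ a < b)

def lexLe (caps : List Int) (a b : Nat) : Prop :=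
  caps.getD a 0 < caps.getD b 0 ∨ (caps.getD a 0 = caps.getD b 0 ∧ a ≤ b)

theorem lexLe_antisymm (caps : List Int) (a b : Nat)
    (h1 : lexLe caps a b) (h2 : lexLe caps b a) : a = b := by
  rcases h1 with h1 | ⟨h1, h1'⟩ <;> rcases h2 with h2 | ⟨h2, h2'⟩ <;> omega

theorem lexLe_trans (caps : List Int) (a b c : Nat)
    (h1 : lexLe caps a b) (h2 : lexLe caps b c) : lexLe caps a c := by
  unfold lexLe at *
  rcases h1 with h1 | ⟨h1, h1'⟩ <;> rcases h2 with h2 | ⟨h2, h2'⟩ <;> omega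

-- the 'keep current unless strictly smaller' step A's loop performs on qualifying indices
def aMin (caps : List Int) (b i : Nat) : Nat :=
  if caps.getD i 0 < caps.getD b 0 then i else b

-- invariant of A's loop: once a candidate j is held, the rest of the loop computes the
-- leftmost-min reduction over the remaining qualifying indices
theorem bestFit_inv (bw : Int) (caps : List Int) :
    ∀ (l : List Nat) (j : Nat),
      l.foldl (bestFitStep bw caps) ((j : Int), caps.getD j 0)
        = ((((l.filter (fun i => decide (bw ≤ caps.getD i 0))).foldl (aMin caps) j : Nat) : Int),
           caps.getD ((l.filter (fun i => decide (bw ≤ caps.getD i 0))).foldl (aMin caps) j) 0) := by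
  intro l
  induction l with
  | nil => intro j; rfl
  | cons i l ih =>
    intro j
    have hji : ((j : Int)) ≠ -1 := by omega
    simp only [List.getD_eq_getElem?_getD] at ih ⊢
    rw [List.foldl_cons, List.filter_cons]
    by_cases hq : bw ≤ caps[i]?.getD 0
    · rw [if_pos (decide_eq_true hq)]
      by_cases hlt : caps[i]?.getD 0 < caps[j]?.getD 0
      · rw [show bestFitStep bw caps ((j : Int), caps[j]?.getD 0) i = ((i : Int), caps[i]?.getD 0) from
              by simp [bestFitStep, hq, hlt],
            List.foldl_cons,
            show aMin caps j i = i from by simp [aMin, hlt]]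
        exact ih i
      · rw [show bestFitStep bw caps ((j : Int), caps[j]?.getD 0) i = ((j : Int), caps[j]?.getD 0) from
              by simp [bestFitStep, hlt, hji],
            List.foldl_cons,
            show aMin caps j i = j from by simp [aMin, hlt]]
        exact ih j
    · rw [show bestFitStep bw caps ((j : Int), caps[j]?.getD 0) i = ((j : Int), caps[j]?.getD 0) from
            by simp [bestFitStep, hq],
          if_neg (by simpa using hq)]
      exact ih j

-- from the sentinel start: A's fold equals -1 on no candidate, else the min reduction
theorem bestFit_main (bw : Int) (caps : List Int) :
    ∀ (l : List Nat),
      (l.foldl (bestFitStep bw caps) (-1, -1)).1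
        = (match l.filter (fun i => decide (bw ≤ caps.getD i 0)) with
           | [] => (-1 : Int)
           | h :: t => ((t.foldl (aMin caps) h : Nat) : Int)) := by
  intro l
  induction l with
  | nil => rfl
  | cons i l ih =>
    simp only [List.getD_eq_getElem?_getD] at ih ⊢
    rw [List.foldl_cons, List.filter_cons]
    by_cases hq : bw ≤ caps[i]?.getD 0
    · rw [show bestFitStep bw caps (-1, -1) i = ((i : Int), caps[i]?.getD 0) from
            by simp [bestFitStep, hq],
          if_pos (decide_eq_true hq)]
      have h := bestFit_inv bw caps l i
      simp only [List.getD_eq_getElem?_getD] at h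
      rw [h]
    · rw [show bestFitStep bw caps (-1, -1) i = (-1, -1) from
            by simp [bestFitStep, hq],
          if_neg (by simpa using hq)]
      exact ih

-- A's min reduction over a list of strictly increasing indices yields the lexLe-minimum
theorem aMin_spec (caps : List Int) :
    ∀ (t : List Nat) (h : Nat), (h :: t).Pairwise (· < ·) →
      (t.foldl (aMin caps) h ∈ h :: t ∧ ∀ x ∈ h :: t, lexLe caps (t.foldl (aMin caps) h) x) := by
  intro t
  induction t with
  | nil =>
    intro h _
    refine ⟨List.mem_singleton.mpr rfl, ?_⟩
    intro x hx
    rw [List.mem_singleton] at hx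
    subst hx
    exact Or.inr ⟨rfl, le_refl _⟩
  | cons i t ih =>
    intro h hp
    have hhi : h < i := (List.pairwise_cons.mp hp).1 i (List.mem_cons_self ..)
    have hp' : (i :: t).Pairwise (· < ·) := (List.pairwise_cons.mp hp).2
    have hlt_t : ∀ x ∈ t, i < x := (List.pairwise_cons.mp hp').1
    by_cases hcmp : caps.getD i 0 < caps.getD h 0
    · have hstep : aMin caps h i = i := by unfold aMin; rw [if_pos hcmp]
      have hp'' : (i :: t).Pairwise (· < ·) := hp'
      obtain ⟨hmem, hmin⟩ := ih i hp''
      rw [List.foldl_cons, hstep]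
      refine ⟨List.mem_cons_of_mem _ hmem, ?_⟩
      intro x hx
      rcases List.mem_cons.mp hx with hx | hx
      · subst hx
        exact lexLe_trans caps _ i x (hmin i (List.mem_cons_self ..)) (Or.inl hcmp)
      · exact hmin x hx
    · have hstep : aMin caps h i = h := by unfold aMin; rw [if_neg hcmp]
      have hp'' : (h :: t).Pairwise (· < ·) := by
        rw [List.pairwise_cons] at hp ⊢
        exact ⟨fun x hx => hp.1 x (List.mem_cons_of_mem _ hx), (List.pairwise_cons.mp hp.2).2⟩
      obtain ⟨hmem, hmin⟩ := ih h hp''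
      rw [List.foldl_cons, hstep]
      refine ⟨?_, ?_⟩
      · rcases List.mem_cons.mp hmem with hm | hm
        · rw [List.mem_cons]; exact Or.inl hm
        · exact List.mem_cons_of_mem _ (List.mem_cons_of_mem _ hm)
      · intro x hx
        rcases List.mem_cons.mp hx with hx | hx
        · exact hx ▸ hmin h (List.mem_cons_self ..)
        rcases List.mem_cons.mp hx with hx | hx
        · subst hx
          refine lexLe_trans caps _ h x (hmin h (List.mem_cons_self ..)) ?_
          unfold lexLe
          omega
        · exact hmin x (List.mem_cons_of_mem _ hx)

-- inserting an index larger than everything held keeps the list lexLt-sorted (stability)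
theorem insertBy_pairwise (caps : List Int) (x : Nat) :
    ∀ (acc : List Nat), acc.Pairwise (lexLt caps) → (∀ a ∈ acc, a < x) →
      (PySem.List.insertBy (fun a b => decide (caps.getD a 0 < caps.getD b 0)) x acc).Pairwise (lexLt caps) := by
  intro acc
  induction acc with
  | nil => intro _ _; simp [PySem.List.insertBy]
  | cons y ys ih =>
    intro hp hlt
    unfold PySem.List.insertBy
    by_cases hb : caps.getD x 0 < caps.getD y 0
    · rw [if_pos (decide_eq_true hb)]
      rw [List.pairwise_cons]
      refine ⟨?_, hp⟩
      intro z hz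
      rcases List.mem_cons.mp hz with hz | hz
      · exact hz ▸ Or.inl hb
      · have := (List.pairwise_cons.mp hp).1 z hz
        unfold lexLt at this ⊢
        rcases this with h | ⟨h, _⟩ <;> exact Or.inl (by omega)
    · rw [if_neg (by simpa using hb)]
      rw [List.pairwise_cons]
      constructor
      · intro z hz
        rcases (PySem.List.mem_insertBy _ _ _ _).mp hz with hz | hz
        · subst hz
          unfold lexLt
          have := hlt y (List.mem_cons_self ..)
          omega
        · exact (List.pairwise_cons.mp hp).1 z hz
      · exact ih (List.pairwise_cons.mp hp).2 (fun a ha => hlt a (List.mem_cons_of_mem _ ha))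

-- folding insertBy over strictly increasing indices yields a lexLt-sorted list
theorem foldl_insertBy_pairwise (caps : List Int) :
    ∀ (l : List Nat) (acc : List Nat), acc.Pairwise (lexLt caps) →
      (∀ a ∈ acc, ∀ x ∈ l, a < x) → l.Pairwise (· < ·) →
      (l.foldl (fun acc x => PySem.List.insertBy (fun a b => decide (caps.getD a 0 < caps.getD b 0)) x acc) acc).Pairwise (lexLt caps) := by
  intro l
  induction l with
  | nil => intro acc hp _ _; exact hp
  | cons x l ih =>
    intro acc hp hlt hpl
    rw [List.foldl_cons]
    refine ih _ ?_ ?_ (List.pairwise_cons.mp hpl).2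
    · exact insertBy_pairwise caps x acc hp (fun a ha => hlt a ha x (List.mem_cons_self ..))
    · intro a ha y hy
      rcases (PySem.List.mem_insertBy _ _ _ _).mp ha with ha | ha
      · exact ha ▸ (List.pairwise_cons.mp hpl).1 y hy
      · exact hlt a ha y (List.mem_cons_of_mem _ hy)

theorem sorted_range_pairwise (caps : List Int) (n : Nat) :
    (PySem.List.sorted (List.range n) (fun i => caps.getD i 0)).Pairwise (lexLt caps) := by
  rw [PySem.List.sorted_eq_foldl_insertBy]
  exact foldl_insertBy_pairwise caps (List.range n) [] (List.Pairwise.nil)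
    (by intro a ha; cases ha) (List.pairwise_lt_range)

-- the first qualifying element of a lexLt-sorted list is the lexLe-minimum of the qualifying ones
theorem find?_spec (bw : Int) (caps : List Int) :
    ∀ (s : List Nat), s.Pairwise (lexLt caps) →
      ∀ m, s.find? (fun i => decide (bw ≤ caps.getD i 0)) = some m →
        (bw ≤ caps.getD m 0 ∧ m ∈ s ∧ ∀ x ∈ s, bw ≤ caps.getD x 0 → lexLe caps m x) := by
  intro s
  induction s with
  | nil => intro _ m h; cases h
  | cons h t ih =>
    intro hp m hf
    by_cases hq : bw ≤ caps.getD h 0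
    · rw [List.find?_cons_of_pos (p := fun i => decide (bw ≤ caps.getD i 0)) (decide_eq_true hq)] at hf
      cases hf
      refine ⟨hq, List.mem_cons_self .., ?_⟩
      intro x hx _
      rcases List.mem_cons.mp hx with hx | hx
      · subst hx; exact Or.inr ⟨rfl, le_refl _⟩
      · have := (List.pairwise_cons.mp hp).1 x hx
        unfold lexLt at this
        unfold lexLe
        omega
    · rw [List.find?_cons_of_neg (p := fun i => decide (bw ≤ caps.getD i 0)) (by simpa using hq)] at hf
      obtain ⟨hqm, hmem, hmin⟩ := ih (List.pairwise_cons.mp hp).2 m hf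
      refine ⟨hqm, List.mem_cons_of_mem _ hmem, ?_⟩
      intro x hx hqx
      rcases List.mem_cons.mp hx with hx | hx
      · exact absurd (hx ▸ hqx) hq
      · exact hmin x hx hqx

-- main equivalence
theorem bestFit_eq (bw : Int) (caps : List Int) : bestFit bw caps = bestFit_alt bw caps := by
  unfold bestFit bestFit_alt
  rw [bestFit_main]
  have hperm := PySem.List.sorted_perm (List.range caps.length) (fun i => caps.getD i 0) false
  have hpair := sorted_range_pairwise caps caps.length
  set s := PySem.List.sorted (List.range caps.length) (fun i => caps.getD i 0) with hs
  set q : Nat → Bool := fun i => decide (bw ≤ caps.getD i 0) with hqdef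
  cases hc : (List.range caps.length).filter q with
  | nil =>
    have hno : ∀ x ∈ List.range caps.length, ¬ q x = true := by
      intro x hx
      have := List.filter_eq_nil_iff.mp hc x hx
      simpa using this
    have : s.find? q = none := by
      rw [List.find?_eq_none]
      intro x hx
      exact hno x (hperm.mem_iff.mp hx)
    simp only [this]
  | cons h t =>
    have hcandp : (h :: t).Pairwise (· < ·) := by
      rw [← hc]
      exact List.Pairwise.filter _ List.pairwise_lt_range
    obtain ⟨hrmem, hrmin⟩ := aMin_spec caps t h hcandp
    set r := t.foldl (aMin caps) h with hr
    have hrfilt : r ∈ (List.range caps.length).filter q := hc ▸ hrmem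
    have hrq : q r = true := (List.mem_filter.mp hrfilt).2
    have hrrange : r ∈ List.range caps.length := (List.mem_filter.mp hrfilt).1
    have hrs : r ∈ s := hperm.mem_iff.mpr hrrange
    have hsome : (s.find? q).isSome := List.find?_isSome.mpr ⟨r, hrs, hrq⟩
    obtain ⟨m, hm⟩ := Option.isSome_iff_exists.mp hsome
    obtain ⟨hqm, hms, hmmin⟩ := find?_spec bw caps s hpair m hm
    have hmcand : m ∈ h :: t := by
      rw [← hc]
      exact List.mem_filter.mpr ⟨hperm.mem_iff.mp hms, decide_eq_true hqm⟩
    have h1 : lexLe caps r m := hrmin m hmcand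
    have h2 : lexLe caps m r := hmmin r hrs (by simpa [hqdef] using hrq)
    have hmr : m = r := lexLe_antisymm caps m r h2 h1
    simp only [hm, hmr]
    exact congrArg (fun k : Nat => (k : Int)) hr

-- ===== VERDICT (by name: the statement is the Claim_ definition above) =====
theorem bestFit_spec : Claim_equal_bestFit := by
  intro bw caps _
  unfold Spec_bestFit
  exact bestFit_eq bw caps
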